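-- pv_equiv track=rewrite | github.com/DanielSCustodio/Course-Trybe | Course-Trybe-CS/02-08-2022[36.2-Arrays]/class/challenges/best_turistic_area.py | best_turistic_area
-- ===== SOURCE A (Python) =====
-- def best_turistic_area(list):
--     max_points = 0
--     for i, n_current in enumerate(list):
--         for j, n_compared in enumerate(list):
--             if i != j:
--                 points = n_current + n_compared - abs(i - j)
--                 if points > max_points:
--                     max_points = points
--     return max_points
-- ===== SOURCE B (Python) =====
-- def best_turistic_area(list):
--     max_points = 0
--     best = None  # max of list[i] + i over the prefix already seen
--     for j, value in enumerate(list):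
--         if best is not None:
--             points = best + value - j
--             if points > max_points:
--                 max_points = points
--         if best is None or value + j > best:
--             best = value + j
--     return max_points
-- ===== Notes on version B (the rewrite author's own statement) =====
-- stated objective: faster
-- what changed: Replaced the O(n^2) all-pairs double loop by a single pass that keeps the running maximum of list[i]+i and combines it with list[j]-j at each position.
import Mathlib
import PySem

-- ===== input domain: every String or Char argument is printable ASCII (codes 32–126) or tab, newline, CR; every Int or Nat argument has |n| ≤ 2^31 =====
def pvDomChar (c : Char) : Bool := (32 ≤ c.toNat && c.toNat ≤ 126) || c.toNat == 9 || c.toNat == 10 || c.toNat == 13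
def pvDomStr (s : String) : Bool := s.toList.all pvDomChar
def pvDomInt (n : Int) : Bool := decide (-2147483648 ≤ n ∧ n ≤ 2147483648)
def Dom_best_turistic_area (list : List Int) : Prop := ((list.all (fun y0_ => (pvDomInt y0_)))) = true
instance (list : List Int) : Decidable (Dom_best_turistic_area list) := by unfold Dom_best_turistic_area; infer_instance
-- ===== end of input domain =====

-- B replaces A's quadratic all-pairs scan by a single pass keeping the best
-- prefix value of list[i]+i (objective: faster, O(n^2) → O(n)).

-- ===== PORT A =====
-- inner loop body of A: 'if i != j: points = …; if points > max_points: …'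
def pvStepInner (i x : Int) (mp : Int) (q : Int × Int) : Int :=
  if i ≠ q.1 then
    let points := x + q.2 - |i - q.1|
    if points > mp then points else mp
  else mp

def best_turistic_area (list : List Int) : Int :=
  (PySem.List.enumerate list 0).foldl
    (fun mp p => (PySem.List.enumerate list 0).foldl (pvStepInner p.1 p.2) mp) 0

-- ===== PORT B =====
-- loop body of B: state = (max_points, best), best = None until the first element
def pvStepAlt (st : Int × Option Int) (p : Int × Int) : Int × Option Int :=
  let mp' := match st.2 with
    | some best => if best + p.2 - p.1 > st.1 then best + p.2 - p.1 else st.1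
    | none => st.1
  let best' := match st.2 with
    | some best => if p.2 + p.1 > best then some (p.2 + p.1) else some best
    | none => some (p.2 + p.1)
  (mp', best')

def best_turistic_area_alt (list : List Int) : Int :=
  ((PySem.List.enumerate list 0).foldl pvStepAlt (0, none)).1

-- ===== PRECONDITION & SPEC =====
def Spec_best_turistic_area (list : List Int) (out : Int) : Prop := out = best_turistic_area_alt list
instance (list : List Int) (out : Int) : Decidable (Spec_best_turistic_area list out) := by unfold Spec_best_turistic_area; infer_instance

-- ===== CLAIM (what is proved, stated in full; the proofs are below) =====
def Claim_equal_best_turistic_area : Prop := ∀ (list : List Int), Dom_best_turistic_area list → Spec_best_turistic_area list (best_turistic_area list)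

-- ===== LEMMAS AND PROOFS =====

-- ---- A side: the double fold is monotone, bounds every candidate, and is attained ----
theorem pvInner_mono (i x : Int) (l : List (Int × Int)) (mp : Int) :
    mp ≤ l.foldl (pvStepInner i x) mp := by
  induction l generalizing mp with
  | nil => simp
  | cons q l ih =>
    refine le_trans ?_ (ih _)
    simp only [pvStepInner]; split_ifs <;> omega

theorem pvInner_ub (i x : Int) (l : List (Int × Int)) (mp : Int) :
    ∀ q ∈ l, i ≠ q.1 → x + q.2 - |i - q.1| ≤ l.foldl (pvStepInner i x) mp := by
  induction l generalizing mp with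
  | nil => simp
  | cons q0 l ih =>
    intro q hq hne
    rw [List.mem_cons] at hq
    rcases hq with hq | hq
    · subst hq
      refine le_trans ?_ (pvInner_mono i x l _)
      simp only [pvStepInner, if_pos hne]
      split_ifs <;> omega
    · exact ih _ q hq hne

theorem pvInner_attained (i x : Int) (l : List (Int × Int)) (mp : Int) :
    l.foldl (pvStepInner i x) mp = mp ∨
      ∃ q ∈ l, i ≠ q.1 ∧ l.foldl (pvStepInner i x) mp = x + q.2 - |i - q.1| := by
  induction l generalizing mp with
  | nil => left; rfl
  | cons q0 l ih =>
    simp only [List.foldl_cons]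
    rcases ih (pvStepInner i x mp q0) with h | ⟨q, hq, hne, h⟩
    · rw [h]
      simp only [pvStepInner]
      split_ifs with h1 h2
      · exact Or.inr ⟨q0, List.mem_cons_self, h1, rfl⟩
      · exact Or.inl rfl
      · exact Or.inl rfl
    · exact Or.inr ⟨q, List.mem_cons_of_mem _ hq, hne, h⟩

theorem pvOuter_mono (E l : List (Int × Int)) (mp : Int) :
    mp ≤ l.foldl (fun mp p => E.foldl (pvStepInner p.1 p.2) mp) mp := by
  induction l generalizing mp with
  | nil => simp
  | cons p l ih => exact le_trans (pvInner_mono _ _ _ _) (ih _)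

theorem pvOuter_ub (E l : List (Int × Int)) (mp : Int) :
    ∀ p ∈ l, ∀ q ∈ E, p.1 ≠ q.1 →
      p.2 + q.2 - |p.1 - q.1| ≤ l.foldl (fun mp p => E.foldl (pvStepInner p.1 p.2) mp) mp := by
  induction l generalizing mp with
  | nil => simp
  | cons p0 l ih =>
    intro p hp q hq hne
    rw [List.mem_cons] at hp
    rcases hp with hp | hp
    · subst hp
      exact le_trans (pvInner_ub _ _ E mp q hq hne) (pvOuter_mono E l _)
    · exact ih _ p hp q hq hne

theorem pvOuter_attained (E l : List (Int × Int)) (mp : Int) :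
    l.foldl (fun mp p => E.foldl (pvStepInner p.1 p.2) mp) mp = mp ∨
      ∃ p ∈ l, ∃ q ∈ E, p.1 ≠ q.1 ∧
        l.foldl (fun mp p => E.foldl (pvStepInner p.1 p.2) mp) mp = p.2 + q.2 - |p.1 - q.1| := by
  induction l generalizing mp with
  | nil => left; rfl
  | cons p0 l ih =>
    simp only [List.foldl_cons]
    rcases ih (E.foldl (pvStepInner p0.1 p0.2) mp) with h | ⟨p, hp, q, hq, hne, h⟩
    · rw [h]
      rcases pvInner_attained p0.1 p0.2 E mp with h2 | ⟨q, hq, hne, h2⟩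
      · exact Or.inl h2
      · exact Or.inr ⟨p0, List.mem_cons_self, q, hq, hne, h2⟩
    · exact Or.inr ⟨p, List.mem_cons_of_mem _ hp, q, hq, hne, h⟩

-- ---- B side: invariants of the single pass ----
-- the step computed on an explicit state pair
theorem pvStepAlt_none (mp : Int) (p : Int × Int) :
    pvStepAlt (mp, none) p = (mp, some (p.2 + p.1)) := rfl

theorem pvStepAlt_some (mp b : Int) (p : Int × Int) :
    pvStepAlt (mp, some b) p =
      (if b + p.2 - p.1 > mp then b + p.2 - p.1 else mp,
       if p.2 + p.1 > b then some (p.2 + p.1) else some b) := rfl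

theorem pvAlt_mono (l : List (Int × Int)) (mp : Int) (bo : Option Int) :
    mp ≤ (l.foldl pvStepAlt (mp, bo)).1 := by
  induction l generalizing mp bo with
  | nil => simp
  | cons p l ih =>
    rcases bo with _ | b
    · rw [List.foldl_cons, pvStepAlt_none]; exact ih mp _
    · rw [List.foldl_cons, pvStepAlt_some]
      refine le_trans ?_ (ih _ _)
      split_ifs <;> omega

-- the max_points field bounds seed + q.2 - q.1 for every q in the remaining list
theorem pvAlt_seed_ub (l : List (Int × Int)) (mp b : Int) :
    ∀ q ∈ l, b + q.2 - q.1 ≤ (l.foldl pvStepAlt (mp, some b)).1 := by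
  induction l generalizing mp b with
  | nil => simp
  | cons p l ih =>
    intro q hq
    rw [List.mem_cons] at hq
    rw [List.foldl_cons, pvStepAlt_some]
    rcases hq with hq | hq
    · subst hq
      refine le_trans ?_ (pvAlt_mono l _ _)
      split_ifs <;> omega
    · split_ifs with h1 h2 h2
      · have := ih (b + p.2 - p.1) (p.2 + p.1) q hq; omega
      · have := ih (b + p.2 - p.1) b q hq; omega
      · have := ih mp (p.2 + p.1) q hq; omega
      · have := ih mp b q hq; omega

theorem pvAlt_pair_ub (l : List (Int × Int)) (mp : Int) (bo : Option Int)
    (hpw : l.Pairwise (fun p q => p.1 < q.1)) :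
    ∀ p ∈ l, ∀ q ∈ l, p.1 < q.1 →
      p.2 + q.2 - (q.1 - p.1) ≤ (l.foldl pvStepAlt (mp, bo)).1 := by
  induction l generalizing mp bo with
  | nil => simp
  | cons p0 l ih =>
    rcases hpw with _ | ⟨hhead, hpw⟩
    intro p hp q hq hlt
    rw [List.mem_cons] at hp hq
    -- the step yields a state (mp1, some b') with p0.2 + p0.1 ≤ b'
    obtain ⟨mp1, b', hstep, hble⟩ :
        ∃ mp1 b', pvStepAlt (mp, bo) p0 = (mp1, some b') ∧ p0.2 + p0.1 ≤ b' := by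
      rcases bo with _ | b
      · exact ⟨mp, p0.2 + p0.1, rfl, le_refl _⟩
      · rw [pvStepAlt_some]
        split_ifs with h1 h2 h2 <;> exact ⟨_, _, rfl, by omega⟩
    rw [List.foldl_cons, hstep]
    rcases hp with hp | hp
    · subst hp
      rcases hq with hq | hq
      · subst hq; omega
      · have := pvAlt_seed_ub l mp1 b' q hq
        omega
    · rcases hq with hq | hq
      · subst hq; exact absurd (hhead p hp) (by omega)
      · exact ih mp1 (some b') hpw p hp q hq hlt

theorem pvAlt_attained (l : List (Int × Int)) (mp : Int) (bo : Option Int)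
    (hpw : l.Pairwise (fun p q => p.1 < q.1)) :
    (l.foldl pvStepAlt (mp, bo)).1 = mp ∨
      (∃ p ∈ l, ∃ q ∈ l, p.1 < q.1 ∧ (l.foldl pvStepAlt (mp, bo)).1 = p.2 + q.2 - (q.1 - p.1)) ∨
      (∃ b, bo = some b ∧ ∃ q ∈ l, (l.foldl pvStepAlt (mp, bo)).1 = b + q.2 - q.1) := by
  induction l generalizing mp bo with
  | nil => left; rfl
  | cons p0 l ih =>
    rcases hpw with _ | ⟨hhead, hpw⟩
    rcases bo with _ | b
    · rw [List.foldl_cons, pvStepAlt_none]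
      rcases ih mp (some (p0.2 + p0.1)) hpw with h | h | ⟨b', hb', q, hq, h⟩
      · exact Or.inl h
      · rcases h with ⟨p, hp, q, hq, hlt, h⟩
        exact Or.inr (Or.inl ⟨p, List.mem_cons_of_mem _ hp, q, List.mem_cons_of_mem _ hq, hlt, h⟩)
      · injection hb' with hb'
        subst hb'
        exact Or.inr (Or.inl ⟨p0, List.mem_cons_self, q, List.mem_cons_of_mem _ hq,
          hhead q hq, by omega⟩)
    · rw [List.foldl_cons, pvStepAlt_some]
      by_cases hmp : b + p0.2 - p0.1 > mp <;>
        by_cases hbe : p0.2 + p0.1 > b <;>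
          simp only [hmp, hbe, if_true, if_false]
      all_goals
        first
        | (rcases ih _ (some (p0.2 + p0.1)) hpw with h | h | ⟨b', hb', q, hq, h⟩
           · rw [h]
             first
             | exact Or.inr (Or.inr ⟨b, rfl, p0, List.mem_cons_self, rfl⟩)
             | exact Or.inl rfl
           · rcases h with ⟨p, hp, q, hq, hlt, h⟩
             exact Or.inr (Or.inl ⟨p, List.mem_cons_of_mem _ hp, q,
               List.mem_cons_of_mem _ hq, hlt, h⟩)
           · injection hb' with hb'
             subst hb'
             exact Or.inr (Or.inl ⟨p0, List.mem_cons_self, q, List.mem_cons_of_mem _ hq,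
               hhead q hq, by omega⟩))
        | (rcases ih _ (some b) hpw with h | h | ⟨b', hb', q, hq, h⟩
           · rw [h]
             first
             | exact Or.inr (Or.inr ⟨b, rfl, p0, List.mem_cons_self, rfl⟩)
             | exact Or.inl rfl
           · rcases h with ⟨p, hp, q, hq, hlt, h⟩
             exact Or.inr (Or.inl ⟨p, List.mem_cons_of_mem _ hp, q,
               List.mem_cons_of_mem _ hq, hlt, h⟩)
           · injection hb' with hb'
             subst hb'
             exact Or.inr (Or.inr ⟨b, rfl, q, List.mem_cons_of_mem _ hq, h⟩))

-- enumerate has strictly increasing first components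
theorem pvEnum_pairwise (xs : List Int) (s : Int) :
    (PySem.List.enumerate xs s).Pairwise (fun p q => p.1 < q.1) := by
  induction xs generalizing s with
  | nil => simp [PySem.List.enumerate_nil]
  | cons x xs ih =>
    rw [PySem.List.enumerate_cons]
    refine List.Pairwise.cons ?_ (ih (s + 1))
    intro q hq
    have : q.1 ∈ (PySem.List.enumerate xs (s + 1)).map (·.1) := List.mem_map_of_mem hq
    rw [PySem.List.map_fst_enumerate] at this
    have := (PySem.List.mem_pyRange_one).1 this
    omega

-- ===== VERDICT (by name: the statement is the Claim_ definition above) =====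
theorem best_turistic_area_spec : Claim_equal_best_turistic_area := by
  intro xs _
  unfold Spec_best_turistic_area best_turistic_area best_turistic_area_alt
  set E := PySem.List.enumerate xs 0 with hE
  have hpw := pvEnum_pairwise xs 0
  rw [← hE] at hpw
  apply le_antisymm
  · -- A ≤ B
    rcases pvOuter_attained E E 0 with h | ⟨p, hp, q, hq, hne, h⟩
    · rw [h]; exact pvAlt_mono E 0 none
    · rw [h]
      rcases lt_or_gt_of_ne hne with hlt | hlt
      · have := pvAlt_pair_ub E 0 none hpw p hp q hq hlt
        have habs : |p.1 - q.1| = q.1 - p.1 := by rw [abs_sub_comm]; exact abs_of_nonneg (by omega)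
        omega
      · have := pvAlt_pair_ub E 0 none hpw q hq p hp hlt
        have habs : |p.1 - q.1| = p.1 - q.1 := abs_of_nonneg (by omega)
        omega
  · -- B ≤ A
    rcases pvAlt_attained E 0 none hpw with h | ⟨p, hp, q, hq, hlt, h⟩ | ⟨b, hb, _⟩
    · rw [h]; exact pvOuter_mono E E 0
    · rw [h]
      have := pvOuter_ub E E 0 p hp q hq (by omega)
      have habs : |p.1 - q.1| = q.1 - p.1 := by rw [abs_sub_comm]; exact abs_of_nonneg (by omega)
      omega
    · exact absurd hb (by simp)
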